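-- pv_equiv track=rewrite | github.com/DagnyTagg2013/CTCI-Python | COMPLEX/StringSimilarSubmit.py | calcSimilarities
-- ===== SOURCE A (Python) =====
-- import collections
--
-- def calcSimilarities(testString):
--
--     similarityMap = collections.OrderedDict()
--     for startSuffix in range(0, len(testString)):
--         # ATTN:  SLICING of current String, like an ARRAY
--         currentSuffix = testString[startSuffix:]
--         for matchIndex in range(0, len(currentSuffix)):
--             if testString[matchIndex] != currentSuffix[matchIndex]:
--                 #ATTN:  this breaks out of ALL loop-levels for some reason
--                 break
--         # CASE 1: FIRST CHAR MISMATCH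
--         # - Exit when first non-match char reached at 0th char; set similarity to 0
--         # CASE 2: PARTIAL SUFFIX MATCH
--         # - Exit when first NON-MATCH char reached; set similarity to matchIndex,
--         # or 1+ for 0-based last actually matching index on prior char at currIdx - 1
--         # CASE 3: FULL SUFFIX MATCH
--         # - Exit when FULL LENGTH of suffix matched; set similarity to matchIndex + 1, for actual LENGTH of 0-indexed strings
--         if (matchIndex == 0) and (testString[0] != currentSuffix[0]):
--             similarityMap[currentSuffix] = 0
--         elif (testString[matchIndex] != currentSuffix[matchIndex]):
--             similarityMap[currentSuffix] = matchIndex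
--         elif (testString[matchIndex] == currentSuffix[matchIndex]):
--             similarityMap[currentSuffix] = matchIndex + 1
--     return similarityMap
-- ===== SOURCE B (Python) =====
-- import collections
--
-- def calcSimilarities(testString):
--     # Z-algorithm: all prefix-match lengths in linear time.
--     n = len(testString)
--     z = [0] * n
--     if n:
--         z[0] = n
--     l = r = 0
--     for i in range(1, n):
--         k = min(r - i, z[i - l]) if i < r else 0
--         while i + k < n and testString[k] == testString[i + k]:
--             k += 1
--         z[i] = k
--         if i + k > r:
--             l, r = i, i + k
--     return collections.OrderedDict((testString[i:], z[i]) for i in range(n))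
-- ===== Notes on version B (the rewrite author's own statement) =====
-- stated objective: faster
-- what changed: Replaced A's per-suffix rescan (compare each suffix against the whole string from scratch) with the Z-algorithm, which reuses the previously computed match window [l,r) to obtain all prefix-match lengths in one linear pass.
import Mathlib
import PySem

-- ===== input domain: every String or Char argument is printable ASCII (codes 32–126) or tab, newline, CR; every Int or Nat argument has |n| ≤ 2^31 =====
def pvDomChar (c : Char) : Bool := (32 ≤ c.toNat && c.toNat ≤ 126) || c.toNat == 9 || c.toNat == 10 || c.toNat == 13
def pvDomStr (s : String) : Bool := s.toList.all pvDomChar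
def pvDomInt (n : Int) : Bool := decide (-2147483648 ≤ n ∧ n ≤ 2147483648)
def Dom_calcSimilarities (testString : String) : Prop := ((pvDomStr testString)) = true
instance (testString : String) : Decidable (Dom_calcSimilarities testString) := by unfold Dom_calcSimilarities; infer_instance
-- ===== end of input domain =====

-- B replaces A's quadratic suffix-by-suffix comparison with the linear-time Z-algorithm
-- (objective: faster on repetitive strings; identical return value).

-- ===== PORT A =====
-- Inner loop of A: `for matchIndex in range(0, len(currentSuffix)): if t[mi] != c[mi]: break`;
-- returns the final value of `matchIndex`. All indices read are in range, so `getD` is exact.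
def aInner (t c : List Char) : List Nat → Nat → Nat
  | [], mi => mi
  | i :: rest, _ => if t.getD i ' ' ≠ c.getD i ' ' then i else aInner t c rest i

def calcSimilarities (testString : String) : List (String × Int) :=
  let t := testString.toList
  let d := (List.range t.length).foldl (fun (d : PySem.Dict String Int) (startSuffix : Nat) =>
    -- currentSuffix = testString[startSuffix:]
    let curr := PySem.List.slice t (some (startSuffix : Int)) none
    let mi := aInner t curr (List.range curr.length) 0
    if mi = 0 ∧ t.getD 0 ' ' ≠ curr.getD 0 ' ' then d.insert (String.ofList curr) 0
    else if t.getD mi ' ' ≠ curr.getD mi ' ' then d.insert (String.ofList curr) (mi : Int)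
    else if t.getD mi ' ' = curr.getD mi ' ' then d.insert (String.ofList curr) ((mi : Int) + 1)
    else d) PySem.Dict.empty
  d.items

-- ===== PORT B =====
-- The `while i + k < n and t[k] == t[i+k]: k += 1` loop of Source B (indices in range, getD exact).
def zExtend (t : List Char) (i : Nat) (k : Nat) : Nat :=
  if h : i + k < t.length ∧ t.getD k ' ' = t.getD (i + k) ' ' then zExtend t i (k + 1) else k
termination_by t.length - (i + k)
decreasing_by omega

def calcSimilarities_alt (testString : String) : List (String × Int) :=
  let t := testString.toList
  let n := t.length
  let z0 : Array Nat := Array.replicate n 0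
  let z0 := if n ≠ 0 then z0.set! 0 n else z0        -- z = [0]*n; if n: z[0] = n
  let res := (List.range' 1 (n - 1)).foldl (fun (st : Array Nat × Nat × Nat) i =>
      let z := st.1
      let l := st.2.1
      let r := st.2.2
      let k0 := if i < r then min (r - i) (z.getD (i - l) 0) else 0
      let k := zExtend t i k0
      let z := z.set! i k
      if i + k > r then (z, i, i + k) else (z, l, r)) (z0, 0, 0)
  -- the keys testString[i:] are pairwise distinct (distinct lengths), so the OrderedDict
  -- comprehension of Source B is exactly this list
  (List.range n).map (fun i => (String.ofList (t.drop i), (res.1.getD i 0 : Int)))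

-- ===== PRECONDITION & SPEC =====
def Spec_calcSimilarities (testString : String) (out : List (String × Int)) : Prop := out = calcSimilarities_alt testString
instance (testString : String) (out : List (String × Int)) : Decidable (Spec_calcSimilarities testString out) := by unfold Spec_calcSimilarities; infer_instance

-- ===== CLAIM (what is proved, stated in full; the proofs are below) =====
def Claim_equal_calcSimilarities : Prop := ∀ (testString : String), Dom_calcSimilarities testString → Spec_calcSimilarities testString (calcSimilarities testString)

-- ===== LEMMAS AND PROOFS =====

-- The common specification: lcp of two char lists, and the Z-value of position i.
def lcp : List Char → List Char → Nat
  | a :: as, b :: bs => if a = b then lcp as bs + 1 else 0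
  | _, _ => 0

def zs (t : List Char) (i : Nat) : Nat := lcp t (t.drop i)

theorem lcp_le_right (a b : List Char) : lcp a b ≤ b.length := by
  induction a generalizing b with
  | nil => simp [lcp]
  | cons x xs ih =>
    cases b with
    | nil => simp [lcp]
    | cons y ys =>
      simp only [lcp]
      split
      · have := ih ys; simp only [List.length_cons]; omega
      · simp

theorem lcp_self (a : List Char) : lcp a a = a.length := by
  induction a with
  | nil => simp [lcp]
  | cons x xs ih => simp [lcp, ih]

theorem lcp_getD (a b : List Char) (j : Nat) (h : j < lcp a b) :
    a.getD j ' ' = b.getD j ' ' := by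
  induction a generalizing b j with
  | nil => simp [lcp] at h
  | cons x xs ih =>
    cases b with
    | nil => simp [lcp] at h
    | cons y ys =>
      simp only [lcp] at h
      split at h
      · cases j with
        | zero => simpa using ‹x = y›
        | succ j' => simpa using ih ys j' (by omega)
      · omega

theorem lcp_mismatch (a b : List Char) (ha : lcp a b < a.length) (hb : lcp a b < b.length) :
    a.getD (lcp a b) ' ' ≠ b.getD (lcp a b) ' ' := by
  induction a generalizing b with
  | nil => simp at ha
  | cons x xs ih =>
    cases b with
    | nil => simp at hb
    | cons y ys =>
      by_cases hxy : x = y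
      · subst hxy
        simp only [lcp, if_true, List.length_cons] at ha hb ⊢
        simpa [List.getD_cons_succ] using ih ys (by omega) (by omega)
      · simp [lcp, hxy]

theorem le_lcp (a b : List Char) (k : Nat) (hka : k ≤ a.length) (hkb : k ≤ b.length)
    (h : ∀ j, j < k → a.getD j ' ' = b.getD j ' ') : k ≤ lcp a b := by
  induction a generalizing b k with
  | nil => simp at hka; omega
  | cons x xs ih =>
    cases k with
    | zero => omega
    | succ k' =>
      cases b with
      | nil => simp at hkb
      | cons y ys =>
        have hxy : x = y := by simpa using h 0 (by omega)
        simp only [lcp, if_pos hxy]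
        have := ih ys k' (by simpa using hka) (by simpa using hkb)
          (fun j hj => by simpa using h (j + 1) (by omega))
        omega

theorem zs_le (t : List Char) (i : Nat) : zs t i ≤ t.length - i := by
  have := lcp_le_right t (t.drop i)
  simpa [zs, List.length_drop] using this

theorem zs_zero (t : List Char) : zs t 0 = t.length := by simp [zs, lcp_self]

theorem getD_drop (t : List Char) (i j : Nat) : (t.drop i).getD j ' ' = t.getD (i + j) ' ' := by
  simp [List.getD, List.getElem?_drop]

theorem zs_match (t : List Char) (i j : Nat) (h : j < zs t i) :
    t.getD j ' ' = t.getD (i + j) ' ' := by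
  have := lcp_getD t (t.drop i) j h
  rwa [getD_drop] at this

theorem zs_mismatch (t : List Char) (i : Nat) (h : i + zs t i < t.length) :
    t.getD (zs t i) ' ' ≠ t.getD (i + zs t i) ' ' := by
  have h1 : zs t i < t.length := by omega
  have h2 : zs t i < (t.drop i).length := by
    have := zs_le t i; simp [List.length_drop]; omega
  have := lcp_mismatch t (t.drop i) h1 h2
  rwa [getD_drop] at this

theorem le_zs (t : List Char) (i k : Nat) (hk : i + k ≤ t.length)
    (h : ∀ j, j < k → t.getD j ' ' = t.getD (i + j) ' ') : k ≤ zs t i := by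
  refine le_lcp t (t.drop i) k (by omega) (by simp [List.length_drop]; omega) ?_
  intro j hj
  rw [getD_drop]
  exact h j hj

-- zExtend reaches exactly zs t i from any sound starting value.
theorem zExtend_eq (t : List Char) (i : Nat) (k : Nat) (hk : k ≤ zs t i) :
    zExtend t i k = zs t i := by
  have hle := zs_le t i
  rcases Nat.lt_or_ge k (zs t i) with hlt | hge
  · rw [zExtend]
    have hcond : i + k < t.length ∧ t.getD k ' ' = t.getD (i + k) ' ' :=
      ⟨by omega, zs_match t i k hlt⟩
    rw [dif_pos hcond]
    exact zExtend_eq t i (k + 1) (by omega)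
  · have hkz : k = zs t i := by omega
    subst hkz
    rw [zExtend]
    rw [dif_neg]
    rintro ⟨h1, h2⟩
    exact zs_mismatch t i h1 h2
termination_by t.length - (i + k)
decreasing_by omega

-- getD through Array.set!.
theorem getD_set! (a : Array Nat) (i j v : Nat) :
    (a.set! i v).getD j 0 = if i = j ∧ j < a.size then v else a.getD j 0 := by
  rcases Decidable.em (j < a.size) with hj | hj
  · rcases Decidable.em (i = j) with rfl | hne
    · simp [Array.getD, hj]
    · simp [Array.getD, hj, hne]
  · simp [Array.getD, hj]

-- The Z-loop invariant.
def ZInv (t : List Char) (i : Nat) (st : Array Nat × Nat × Nat) : Prop :=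
  st.1.size = t.length ∧
  (∀ j, j < i → st.1.getD j 0 = zs t j) ∧
  ((st.2.1 = 0 ∧ st.2.2 = 0) ∨ (1 ≤ st.2.1 ∧ st.2.1 < i ∧ st.2.2 ≤ st.2.1 + zs t st.2.1))

def zStep (t : List Char) (st : Array Nat × Nat × Nat) (i : Nat) : Array Nat × Nat × Nat :=
  let z := st.1
  let l := st.2.1
  let r := st.2.2
  let k0 := if i < r then min (r - i) (z.getD (i - l) 0) else 0
  let k := zExtend t i k0
  let z := z.set! i k
  if i + k > r then (z, i, i + k) else (z, l, r)

theorem zStep_inv (t : List Char) (i : Nat) (st : Array Nat × Nat × Nat)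
    (h1 : 1 ≤ i) (h2 : i < t.length) (hinv : ZInv t i st) : ZInv t (i + 1) (zStep t st i) := by
  obtain ⟨hsz, hvals, hwin⟩ := hinv
  obtain ⟨z, l, r⟩ := st
  simp only at hsz hvals hwin
  -- the starting value k0 is sound: k0 ≤ zs t i
  have hk0 : (if i < r then min (r - i) (z.getD (i - l) 0) else 0) ≤ zs t i := by
    split
    · rename_i hir
      rcases hwin with ⟨rfl, rfl⟩ | ⟨hl1, hli, hrle⟩
      · omega
      · have hzil : z.getD (i - l) 0 = zs t (i - l) := hvals (i - l) (by omega)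
        rw [hzil]
        have hzl := zs_le t l
        refine le_zs t i _ (by omega) ?_
        intro j hj
        have hj1 : j < r - i := by omega
        have hj2 : j < zs t (i - l) := by omega
        have e1 : t.getD j ' ' = t.getD ((i - l) + j) ' ' := zs_match t (i - l) j hj2
        have e2 : t.getD ((i - l) + j) ' ' = t.getD (l + ((i - l) + j)) ' ' := by
          exact zs_match t l ((i - l) + j) (by omega)
        rw [e1, e2]
        congr 1
        omega
    · omega
  have hk : zExtend t i (if i < r then min (r - i) (z.getD (i - l) 0) else 0) = zs t i :=
    zExtend_eq t i _ hk0
  unfold zStep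
  simp only [hk]
  have hsz' : (z.set! i (zs t i)).size = t.length := by simp [hsz]
  have hvals' : ∀ j, j < i + 1 → (z.set! i (zs t i)).getD j 0 = zs t j := by
    intro j hj
    rw [getD_set!]
    rcases Decidable.em (i = j) with rfl | hne
    · simp [hsz, h2]
    · rw [if_neg (by tauto)]
      exact hvals j (by omega)
  split
  · rename_i hgt
    refine ⟨hsz', hvals', Or.inr ?_⟩
    dsimp only
    exact ⟨h1, by omega, by omega⟩
  · rename_i hle
    refine ⟨hsz', hvals', ?_⟩
    dsimp only
    rcases hwin with ⟨rfl, rfl⟩ | ⟨hl1, hli, hrle⟩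
    · omega
    · exact Or.inr ⟨hl1, by omega, hrle⟩

theorem zFold_inv (t : List Char) (m a : Nat) (st : Array Nat × Nat × Nat)
    (h1 : 1 ≤ a) (h2 : a + m ≤ t.length) (hinv : ZInv t a st) :
    ZInv t (a + m) ((List.range' a m).foldl (zStep t) st) := by
  induction m generalizing a st with
  | zero => simpa using hinv
  | succ m' ih =>
    rw [List.range'_succ]
    simp only [List.foldl_cons]
    have := ih (a + 1) (zStep t st a) (by omega) (by omega)
      (zStep_inv t a st h1 (by omega) hinv)
    have harr : a + 1 + m' = a + (m' + 1) := by omega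
    rwa [harr] at this

-- A's inner loop: with L := lcp t c and no mismatch before index j, the loop over
-- indices j, j+1, …, j+m-1 (with j+m = |c|) stops at L if a mismatch exists, else at |c|-1.
theorem aInner_spec (t c : List Char) (hlen : c.length ≤ t.length) (m j mi : Nat)
    (hj : j ≤ lcp t c) (hjm : j + m = c.length) :
    aInner t c (List.range' j m) mi =
      if lcp t c < c.length then lcp t c else (if m = 0 then mi else c.length - 1) := by
  induction m generalizing j mi with
  | zero =>
    have hge := lcp_le_right t c
    have : lcp t c = c.length := by omega
    simp [aInner, this]
  | succ m' ih =>
    rw [List.range'_succ]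
    simp only [aInner]
    rcases Nat.lt_or_ge j (lcp t c) with hlt | hge
    · rw [if_neg (by simpa using lcp_getD t c j hlt)]
      have := ih (j + 1) j (by omega) (by omega)
      rw [this]
      have hle := lcp_le_right t c
      rcases Decidable.em (lcp t c < c.length) with hc | hc
      · simp [hc]
      · have hLc : lcp t c = c.length := by omega
        rcases Decidable.em (m' = 0) with rfl | hm
        · simp [hLc]; omega
        · simp [hc, hm]
    · have hjL : j = lcp t c := by omega
      subst hjL
      have hm1 : lcp t c < c.length := by omega
      have hmt : lcp t c < t.length := by omega
      rw [if_pos (lcp_mismatch t c hmt hm1)]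
      simp [hm1]

-- The canonical value both sides compute.
def canon (t : List Char) : List (String × Int) :=
  (List.range t.length).map (fun i => (String.ofList (t.drop i), (zs t i : Int)))

-- suffix keys are pairwise distinct
theorem suffix_keys_nodup (t : List Char) :
    ((List.range t.length).map (fun i => String.ofList (t.drop i))).Nodup := by
  refine List.Nodup.map_on ?_ (List.nodup_range)
  intro i hi j hj hmk
  have : (t.drop i) = (t.drop j) := by
    have := congrArg String.toList hmk
    simpa using this
  have hlen := congrArg List.length this
  simp only [List.length_drop] at hlen
  simp only [List.mem_range] at hi hj
  omega

-- A's loop body equals a fresh insert of (suffix i, zs i).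
theorem a_body_eq (t : List Char) (d : PySem.Dict String Int) (i : Nat) (hi : i < t.length) :
    (let curr := PySem.List.slice t (some (i : Int)) none
     let mi := aInner t curr (List.range curr.length) 0
     if mi = 0 ∧ t.getD 0 ' ' ≠ curr.getD 0 ' ' then d.insert (String.ofList curr) 0
     else if t.getD mi ' ' ≠ curr.getD mi ' ' then d.insert (String.ofList curr) (mi : Int)
     else if t.getD mi ' ' = curr.getD mi ' ' then d.insert (String.ofList curr) ((mi : Int) + 1)
     else d) = d.insert (String.ofList (t.drop i)) ((zs t i : Int)) := by
  have hslice : PySem.List.slice t (some (i : Int)) none = t.drop i :=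
    PySem.List.slice_from_natCast t i
  simp only [hslice]
  set c := t.drop i with hc
  have hclen : c.length = t.length - i := by simp [hc]
  have hlen : c.length ≤ t.length := by omega
  have hL : lcp t c = zs t i := rfl
  have hcpos : 0 < c.length := by omega
  have hmi := aInner_spec t c hlen c.length 0 0 (by omega) (by omega)
  rw [List.range_eq_range']
  have hzle : zs t i ≤ c.length := by have := lcp_le_right t c; omega
  rcases Decidable.em (zs t i < c.length) with hlt | hnlt
  · -- a mismatch exists at index zs t i
    have hmi' : aInner t c (List.range' 0 c.length) 0 = zs t i := by
      rw [hmi, hL, if_pos hlt]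
    rw [hmi']
    have hmis : t.getD (zs t i) ' ' ≠ c.getD (zs t i) ' ' := by
      have h1 : zs t i < t.length := by omega
      exact lcp_mismatch t c h1 hlt
    rcases Nat.eq_zero_or_pos (zs t i) with hz | hz
    · rw [hz] at hmis ⊢
      rw [if_pos ⟨rfl, hmis⟩]
      norm_num
    · rw [if_neg (by simp; intro h; omega)]
      rw [if_pos hmis]
  · -- full suffix match: zs t i = |c|, loop ran to the end
    have hLc : zs t i = c.length := by omega
    have hmi' : aInner t c (List.range' 0 c.length) 0 = c.length - 1 := by
      rw [hmi, hL, if_neg hnlt, if_neg (by omega)]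
    rw [hmi']
    have hmatch : t.getD (c.length - 1) ' ' = c.getD (c.length - 1) ' ' :=
      lcp_getD t c (c.length - 1) (by omega)
    have hne0 : ¬(c.length - 1 = 0 ∧ t.getD 0 ' ' ≠ c.getD 0 ' ') := by
      rintro ⟨h0, hm0⟩
      rw [h0] at hmatch
      exact hm0 hmatch
    rw [if_neg hne0, if_neg (by simpa using hmatch), if_pos hmatch]
    congr 1
    omega

-- A computes the canonical list.
theorem calcSimilarities_eq_canon (s : String) : calcSimilarities s = canon s.toList := by
  unfold calcSimilarities canon
  set t := s.toList with ht
  simp only []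
  have hfold :
      (List.range t.length).foldl (fun (d : PySem.Dict String Int) (startSuffix : Nat) =>
        let curr := PySem.List.slice t (some (startSuffix : Int)) none
        let mi := aInner t curr (List.range curr.length) 0
        if mi = 0 ∧ t.getD 0 ' ' ≠ curr.getD 0 ' ' then d.insert (String.ofList curr) 0
        else if t.getD mi ' ' ≠ curr.getD mi ' ' then d.insert (String.ofList curr) (mi : Int)
        else if t.getD mi ' ' = curr.getD mi ' ' then d.insert (String.ofList curr) ((mi : Int) + 1)
        else d) PySem.Dict.empty
      = (List.range t.length).foldl
          (fun (d : PySem.Dict String Int) i => d.insert (String.ofList (t.drop i)) ((zs t i : Int)))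
          PySem.Dict.empty := by
    refine PySem.List.foldl_congr_mem _ _ _ _ ?_
    intro d i hi
    exact a_body_eq t d i (by simpa using hi)
  rw [hfold]
  have hitems := PySem.Dict.items_foldl_insert_fresh (List.range t.length)
    (fun i => String.ofList (t.drop i)) (fun i => ((zs t i : Int))) PySem.Dict.empty
    (by intro a _; simp) (suffix_keys_nodup t)
  simp only [hitems]
  simp [PySem.Dict.empty]

-- B computes the canonical list.
theorem calcSimilarities_alt_eq_canon (s : String) : calcSimilarities_alt s = canon s.toList := by
  unfold calcSimilarities_alt canon
  set t := s.toList with ht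
  simp only []
  rcases Nat.eq_zero_or_pos t.length with hn | hn
  · simp [hn]
  · have hne : t.length ≠ 0 := by omega
    rw [if_pos hne]
    set z0 : Array Nat := (Array.replicate t.length (0 : Nat)).set! 0 t.length with hz0
    have hinv0 : ZInv t 1 (z0, 0, 0) := by
      refine ⟨by simp [hz0], ?_, Or.inl ⟨rfl, rfl⟩⟩
      intro j hj
      have hj0 : j = 0 := by omega
      subst hj0
      rw [hz0, getD_set!]
      rw [if_pos ⟨rfl, by simpa using hn⟩, zs_zero]
    have hinv := zFold_inv t (t.length - 1) 1 (z0, 0, 0) (by omega) (by omega) hinv0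
    have harr : 1 + (t.length - 1) = t.length := by omega
    rw [harr] at hinv
    obtain ⟨hsz, hvals, -⟩ := hinv
    apply List.map_congr_left
    intro i hi
    simp only [List.mem_range] at hi
    have : ((List.range' 1 (t.length - 1)).foldl (zStep t) (z0, 0, 0)).1.getD i 0 = zs t i :=
      hvals i hi
    have hstep : (List.range' 1 (t.length - 1)).foldl
        (fun (st : Array Nat × Nat × Nat) i =>
          let z := st.1
          let l := st.2.1
          let r := st.2.2
          let k0 := if i < r then min (r - i) (z.getD (i - l) 0) else 0
          let k := zExtend t i k0
          let z := z.set! i k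
          if i + k > r then (z, i, i + k) else (z, l, r)) (z0, 0, 0)
        = (List.range' 1 (t.length - 1)).foldl (zStep t) (z0, 0, 0) := rfl
    rw [hstep, this]

-- ===== VERDICT (by name: the statement is the Claim_ definition above) =====
theorem calcSimilarities_spec : Claim_equal_calcSimilarities := by
  intro s _
  unfold Spec_calcSimilarities
  rw [calcSimilarities_eq_canon, calcSimilarities_alt_eq_canon]
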